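-- pv_equiv track=rewrite | github.com/fkie/multimaster_fkie | fkie_multimaster_pylib/fkie_multimaster_pylib/launch/xml.py | remove_after_space
-- ===== SOURCE A (Python) =====
-- def remove_after_space(filename: str) -> str:
--     result = filename
--     if filename:
--         idx_whitespace = -1
--         idx = len(filename) - 1
--         for c in reversed(filename):
--             if c == '.':
--                 break
--             elif c == ' ':
--                 idx_whitespace = idx
--             idx -= 1
--         if idx > -1 and idx_whitespace > -1:
--             result = filename[:idx_whitespace]
--     return result
-- ===== SOURCE B (Python) =====
-- def remove_after_space(filename: str) -> str:
--     dot = filename.rfind('.')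
--     if dot == -1:
--         return filename
--     sp = filename.find(' ', dot + 1)
--     return filename if sp == -1 else filename[:sp]
-- ===== Notes on version B (the rewrite author's own statement) =====
-- stated objective: simpler
-- what changed: Replaces the manual backward character loop (which tracks both the break-at-dot index and the leftmost following space) by two standard-library index searches: a reverse find of the last dot, then a forward find of the first space after it; the C-level searches are also measurably faster.
import Mathlib
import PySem

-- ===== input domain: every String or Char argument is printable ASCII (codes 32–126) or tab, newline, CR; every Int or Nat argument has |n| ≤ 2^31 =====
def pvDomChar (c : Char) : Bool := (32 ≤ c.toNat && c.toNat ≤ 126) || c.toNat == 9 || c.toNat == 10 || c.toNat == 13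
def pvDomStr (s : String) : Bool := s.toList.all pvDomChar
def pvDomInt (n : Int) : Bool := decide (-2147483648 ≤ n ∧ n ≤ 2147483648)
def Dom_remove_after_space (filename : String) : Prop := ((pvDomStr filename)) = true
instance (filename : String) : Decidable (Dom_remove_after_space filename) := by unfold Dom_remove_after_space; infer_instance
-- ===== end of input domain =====

-- B replaces A's manual backward character loop by two library index searches (rfind '.' then find ' ' from dot+1); simpler decomposition.

-- ===== PORT A =====
-- the 'for c in reversed(filename)' loop with its break; state = (idx, idx_whitespace)
def removeLoopA : List Char → Int → Int → Int × Int
  | [], idx, iw => (idx, iw)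
  | c :: rest, idx, iw =>
    if c = '.' then (idx, iw)
    else removeLoopA rest (idx - 1) (if c = ' ' then idx else iw)

def remove_after_space (filename : String) : String :=
  let result := filename
  if filename = "" then result
  else
    let p := removeLoopA filename.toList.reverse (PySem.Str.len filename - 1) (-1)
    if p.1 > -1 ∧ p.2 > -1 then PySem.Str.slice filename none (some p.2) else result

-- ===== PORT B =====
def remove_after_space_alt (filename : String) : String :=
  let dot := PySem.Str.rfind filename "."
  if dot = -1 then filename
  else
    let sp := PySem.Str.findFrom filename " " (dot + 1)
    if sp = -1 then filename else PySem.Str.slice filename none (some sp)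

-- ===== PRECONDITION & SPEC =====
def Spec_remove_after_space (filename : String) (out : String) : Prop := out = remove_after_space_alt filename
instance (filename : String) (out : String) : Decidable (Spec_remove_after_space filename out) := by unfold Spec_remove_after_space; infer_instance

-- ===== CLAIM (what is proved, stated in full; the proofs are below) =====
def Claim_equal_remove_after_space : Prop := ∀ (filename : String), Dom_remove_after_space filename → Spec_remove_after_space filename (remove_after_space filename)

-- ===== LEMMAS AND PROOFS =====

-- index of the FIRST occurrence of c in t (none if absent)
def firstIdx? : List Char → Char → Option Nat
  | [], _ => none
  | a :: t, c => if a = c then some 0 else (firstIdx? t c).map (· + 1)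

-- index of the LAST occurrence of c in t (none if absent)
def lastIdx? : List Char → Char → Option Nat
  | [], _ => none
  | a :: t, c =>
    match lastIdx? t c with
    | some j => some (j + 1)
    | none => if a = c then some 0 else none

theorem lastIdx?_lt {t : List Char} {c : Char} {j : Nat} (h : lastIdx? t c = some j) : j < t.length := by
  induction t generalizing j with
  | nil => simp [lastIdx?] at h
  | cons a t ih =>
    simp only [lastIdx?] at h
    simp only [List.length_cons]
    cases ht : lastIdx? t c with
    | some k => rw [ht] at h; simp at h; have := ih ht; omega
    | none =>
      rw [ht] at h
      split_ifs at h with hac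
      simp at h; omega

theorem firstIdx?_lt {t : List Char} {c : Char} {j : Nat} (h : firstIdx? t c = some j) : j < t.length := by
  induction t generalizing j with
  | nil => simp [firstIdx?] at h
  | cons a t ih =>
    simp only [firstIdx?] at h
    simp only [List.length_cons]
    split_ifs at h with ha
    · simp at h; omega
    · cases ht : firstIdx? t c with
      | some k => rw [ht] at h; simp at h; have := ih ht; omega
      | none => rw [ht] at h; simp at h

theorem firstIdx?_append (a b : List Char) (c : Char) :
    firstIdx? (a ++ b) c =
      match firstIdx? a c with
      | some j => some j
      | none => (firstIdx? b c).map (a.length + ·) := by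
  induction a with
  | nil => simp [firstIdx?]
  | cons x a ih =>
    simp only [List.cons_append, firstIdx?, ih]
    split_ifs with hx
    · rfl
    · cases firstIdx? a c <;> cases firstIdx? b c <;> simp <;> omega

theorem lastIdx?_append (a b : List Char) (c : Char) :
    lastIdx? (a ++ b) c =
      match lastIdx? b c with
      | some j => some (a.length + j)
      | none => lastIdx? a c := by
  induction a with
  | nil => cases h : lastIdx? b c <;> simp [lastIdx?, h]
  | cons x a ih =>
    simp only [List.cons_append, lastIdx?, ih]
    cases lastIdx? b c with
    | some j =>
      simp only []
      cases lastIdx? a c <;> simp [lastIdx?] <;> omega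
    | none => rfl

theorem firstIdx?_reverse (l : List Char) (c : Char) :
    firstIdx? l.reverse c = (lastIdx? l c).map (fun j => l.length - 1 - j) := by
  induction l with
  | nil => simp [firstIdx?, lastIdx?]
  | cons a l ih =>
    simp only [List.reverse_cons, firstIdx?_append, ih, lastIdx?]
    cases hl : lastIdx? l c with
    | some j =>
      have := lastIdx?_lt hl
      simp only [Option.map_some]
      simp; omega
    | none =>
      simp only [Option.map_none, firstIdx?]
      split_ifs with ha <;> simp [List.length_reverse]

theorem lastIdx?_reverse (w : List Char) (c : Char) :
    lastIdx? w.reverse c = (firstIdx? w c).map (fun j => w.length - 1 - j) := by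
  have h := firstIdx?_reverse w.reverse c
  rw [List.reverse_reverse] at h
  cases hw : lastIdx? w.reverse c with
  | some i =>
    have hi : i < w.length := by
      have := lastIdx?_lt (t := w.reverse) hw; simpa using this
    rw [hw] at h; simp at h
    rw [h]; simp; omega
  | none =>
    rw [hw] at h; simp at h
    rw [h]; rfl

-- the loop characterisation: break at the first '.', idx_whitespace at the last ' ' before it
theorem removeLoopA_spec (r : List Char) (idx iw : Int) :
    removeLoopA r idx iw =
      (idx - ((firstIdx? r '.').getD r.length : Nat),
       match lastIdx? (r.take ((firstIdx? r '.').getD r.length)) ' ' with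
       | some j => idx - j
       | none => iw) := by
  induction r generalizing idx iw with
  | nil => simp [removeLoopA, firstIdx?, lastIdx?]
  | cons a r ih =>
    by_cases ha : a = '.'
    · subst ha; simp [removeLoopA, firstIdx?, lastIdx?]
    · simp only [removeLoopA, if_neg ha, ih]
      have hg : ((firstIdx? (a :: r) '.').getD (a :: r).length) = ((firstIdx? r '.').getD r.length) + 1 := by
        simp only [firstIdx?, if_neg ha]
        cases firstIdx? r '.' <;> simp
      rw [hg]
      simp only [List.take_succ_cons, lastIdx?]
      cases hl : lastIdx? (r.take ((firstIdx? r '.').getD r.length)) ' ' with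
      | some j =>
        simp only [hl]
        refine Prod.ext ?_ ?_
        · push_cast; ring
        · push_cast; ring
      | none =>
        simp only [hl]
        by_cases hsp : a = ' '
        · simp only [if_pos hsp]
          refine Prod.ext ?_ ?_
          · push_cast; ring
          · simp
        · simp only [if_neg hsp]
          refine Prod.ext ?_ ?_
          · push_cast; ring
          · rfl

-- PySem.Chars.find on a one-character needle is firstIdx?
theorem isPrefixOf_singleton_nil (c : Char) : [c].isPrefixOf ([] : List Char) = false := rfl

theorem isPrefixOf_singleton_cons (c a : Char) (t : List Char) :
    [c].isPrefixOf (a :: t) = (a == c) := by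
  simp [List.isPrefixOf, BEq.comm]

theorem find_go_singleton (c : Char) (t : List Char) (k : Nat) :
    PySem.Chars.find.go [c] t k =
      match firstIdx? t c with
      | some j => ((k + j : Nat) : Int)
      | none => -1 := by
  induction t generalizing k with
  | nil => simp [PySem.Chars.find.go, firstIdx?]
  | cons a t ih =>
    simp only [PySem.Chars.find.go, isPrefixOf_singleton_cons]
    by_cases ha : a = c
    · simp [firstIdx?, ha]
    · have hbe : (a == c) = false := by simp [ha]
      rw [hbe]
      simp only [Bool.false_eq_true, if_false, ih]
      simp only [firstIdx?, if_neg ha]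
      cases h : firstIdx? t c with
      | some j => simp only [Option.map_some]; push_cast; ring
      | none => simp

theorem find_singleton (c : Char) (t : List Char) :
    PySem.Chars.find t [c] =
      match firstIdx? t c with
      | some j => (j : Int)
      | none => -1 := by
  simpa using find_go_singleton c t 0

theorem rfind_go_singleton (c : Char) (l : List Char) (m : Nat) :
    PySem.Chars.rfind.go l [c] m =
      match lastIdx? (l.take (m + 1)) c with
      | some j => (j : Int)
      | none => -1 := by
  induction m with
  | zero =>
    simp only [PySem.Chars.rfind.go]
    cases l with
    | nil => simp [lastIdx?, isPrefixOf_singleton_nil]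
    | cons a t =>
      rw [isPrefixOf_singleton_cons]
      by_cases ha : a = c <;> simp [ha, lastIdx?]
  | succ m ih =>
    simp only [PySem.Chars.rfind.go]
    by_cases hm : m + 1 < l.length
    · have hdrop : l.drop (m + 1) = l[m + 1] :: l.drop (m + 2) := by
        rw [List.drop_eq_getElem_cons hm]
      rw [hdrop, isPrefixOf_singleton_cons]
      have htake : l.take (m + 2) = l.take (m + 1) ++ [l[m + 1]] := by
        rw [← List.take_concat_get']
      rw [htake, lastIdx?_append]
      by_cases hc : l[m + 1] = c
      · have hbe : (l[m+1] == c) = true := by simp [hc]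
        rw [hbe]
        simp only [lastIdx?, if_pos hc]
        have hlen : (l.take (m + 1)).length = m + 1 := by simp; omega
        simp [hlen]
      · have hbe : (l[m+1] == c) = false := by simp [hc]
        rw [hbe]
        simp only [lastIdx?, if_neg hc]
        simpa using ih
    · have hdrop : l.drop (m + 1) = [] := by
        rw [List.drop_eq_nil_iff]; omega
      rw [hdrop, isPrefixOf_singleton_nil]
      have htake : l.take (m + 2) = l.take (m + 1) := by
        rw [List.take_of_length_le (by omega), List.take_of_length_le (by omega)]
      simp only [Bool.false_eq_true, if_false]
      rw [htake]
      exact ih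

theorem rfind_singleton (c : Char) (l : List Char) :
    PySem.Chars.rfind l [c] =
      match lastIdx? l c with
      | some j => (j : Int)
      | none => -1 := by
  have h := rfind_go_singleton c l l.length
  rw [List.take_of_length_le (by omega)] at h
  simpa [PySem.Chars.rfind] using h

-- Python-level facts assembled: A's broken-at-dot backward scan equals rfind/findFrom
theorem main_equiv (filename : String) :
    remove_after_space filename = remove_after_space_alt filename := by
  unfold remove_after_space remove_after_space_alt
  dsimp only
  have hlen : PySem.Str.len filename = (filename.toList.length : Int) := by
    simp [PySem.Str.len]
  have hrf : PySem.Str.rfind filename "." = PySem.Chars.rfind filename.toList ['.'] := by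
    rw [PySem.Str.rfind_eq]; rfl
  set l := filename.toList with hl
  have hrfs := rfind_singleton '.' l
  cases hd : lastIdx? l '.' with
  | none =>
    -- no dot: both sides return filename
    have hdot : PySem.Str.rfind filename "." = -1 := by rw [hrf, hrfs, hd]
    rw [hdot]
    simp only [if_pos rfl]
    by_cases hemp : filename = ""
    · simp [hemp]
    · rw [if_neg hemp]
      rw [removeLoopA_spec]
      have hfr : firstIdx? l.reverse '.' = none := by
        rw [firstIdx?_reverse, hd]; rfl
      rw [hfr]
      simp only [Option.getD_none, List.length_reverse]
      have : ¬ (PySem.Str.len filename - 1 - (l.length : Int) > -1 ∧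
          (match lastIdx? (l.reverse.take l.length) ' ' with
           | some j => PySem.Str.len filename - 1 - (j : Int)
           | none => (-1 : Int)) > -1) := by
        rw [hlen]; intro hc; omega
      rw [if_neg this]
      simp
  | some d =>
    have hdlt : d < l.length := lastIdx?_lt hd
    have hdot : PySem.Str.rfind filename "." = (d : Int) := by rw [hrf, hrfs, hd]
    rw [hdot]
    rw [if_neg (show ¬((d : Int) = -1) from by omega)]
    have hemp : ¬ filename = "" := by
      intro h
      have : l = [] := by rw [hl, h]; rfl
      rw [this] at hdlt; simp at hdlt
    rw [if_neg hemp]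
    -- B's search for the first space after the dot
    have hff : PySem.Str.findFrom filename " " ((d : Int) + 1) =
        if PySem.Chars.find (l.drop (d + 1)) [' '] = -1 then -1
        else ((d : Nat) + 1 : Nat) + PySem.Chars.find (l.drop (d + 1)) [' '] := by
      rw [PySem.Str.findFrom_eq]
      have : ((d : Int) + 1) = (((d + 1 : Nat)) : Int) := by push_cast; ring
      rw [this]
      have h2 := PySem.Chars.findFrom_natCast l [' '] (d + 1) (by omega)
      rw [show (" ".toList) = [' '] from rfl]
      rw [← hl]
      exact h2
    -- A's loop
    rw [removeLoopA_spec]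
    have hfr : firstIdx? l.reverse '.' = some (l.length - 1 - d) := by
      rw [firstIdx?_reverse, hd]; rfl
    rw [hfr]
    simp only [Option.getD_some]
    have htk : l.reverse.take (l.length - 1 - d) = (l.drop (d + 1)).reverse := by
      rw [List.take_reverse]
      have h3 : l.length - (l.length - 1 - d) = d + 1 := by omega
      rw [h3]
    rw [htk, lastIdx?_reverse]
    have hfs := find_singleton ' ' (l.drop (d + 1))
    cases hs : firstIdx? (l.drop (d + 1)) ' ' with
    | none =>
      rw [hs] at hfs
      have hfs' : PySem.Chars.find (l.drop (d + 1)) [' '] = -1 := by rw [hfs]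
      rw [hff, hfs']
      simp
    | some j =>
      have hjlt : j < (l.drop (d + 1)).length := firstIdx?_lt hs
      rw [List.length_drop] at hjlt
      rw [hs] at hfs
      have hfs' : PySem.Chars.find (l.drop (d + 1)) [' '] = (j : Int) := by rw [hfs]
      rw [hff, hfs']
      rw [if_neg (show ¬((j : Int) = -1) from by omega)]
      rw [if_neg (show ¬(((d + 1 : Nat) : Int) + (j : Int) = -1) from by push_cast; omega)]
      simp only [Option.map_some]
      have hcond : (PySem.Str.len filename - 1 - ((l.length - 1 - d : Nat) : Int) > -1 ∧
          (match some ((l.drop (d + 1)).length - 1 - j) with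
           | some j => PySem.Str.len filename - 1 - (j : Int)
           | none => (-1 : Int)) > -1) := by
        rw [hlen, List.length_drop]
        constructor <;> simp <;> omega
      rw [if_pos hcond]
      have hval : PySem.Str.len filename - 1 - (((l.drop (d + 1)).length - 1 - j : Nat) : Int) =
          ((d + 1 : Nat) : Int) + (j : Int) := by
        rw [hlen, List.length_drop]
        omega
      rw [hval]

-- ===== VERDICT (by name: the statement is the Claim_ definition above) =====
theorem remove_after_space_spec : Claim_equal_remove_after_space := by
  intro filename _
  exact main_equiv filename
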